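-- pv_equiv track=rewrite | github.com/mr-walls/RomanNumeralConverter | main.py | pattern_creator
-- ===== SOURCE A (Python) =====
-- def pattern_creator(digit):
--     nums = [1, 5, 10]
--     if digit in nums:
--         return [digit]
--     for i in nums:
--         for j in nums:
--             if i - j == digit and i != j:
--                 return [j, i]
--     # if we had to extend to include something like 3, 30, 300... this would become a loop
--     if digit > 5:
--         return [5] + [1] * (digit-5)
--     return [1] * digit
-- ===== SOURCE B (Python) =====
-- def pattern_creator(digit):
--     # closed-form arithmetic case analysis for one roman-numeral digit position
--     if digit == 4 or digit == 9:
--         return [1, digit + 1]          # subtractive forms IV / IX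
--     if digit == 10:
--         return [10]
--     if digit >= 5:
--         return [5] + [1] * (digit - 5)
--     return [1] * digit                 # 0..4; empty for digit <= 0
-- ===== Notes on version B (the rewrite author's own statement) =====
-- stated objective: simpler
-- what changed: The membership test plus nested 3x3 subtractive-pair scan over the nums list is replaced by closed-form arithmetic case analysis (subtractive digits 4/9 computed as [1, digit+1], one unified >=5 branch), with no container or loop at all.
-- intended difference: On the negative digits -4, -5 and -9 A's nested subtractive loop accidentally fires and returns a reversed pair such as [5, 1]; B returns [] there as for every other negative digit, the intended value since a digit position is never negative. — e.g. on pattern_creator(-4): A returns [5, 1], B returns []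
import Mathlib
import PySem

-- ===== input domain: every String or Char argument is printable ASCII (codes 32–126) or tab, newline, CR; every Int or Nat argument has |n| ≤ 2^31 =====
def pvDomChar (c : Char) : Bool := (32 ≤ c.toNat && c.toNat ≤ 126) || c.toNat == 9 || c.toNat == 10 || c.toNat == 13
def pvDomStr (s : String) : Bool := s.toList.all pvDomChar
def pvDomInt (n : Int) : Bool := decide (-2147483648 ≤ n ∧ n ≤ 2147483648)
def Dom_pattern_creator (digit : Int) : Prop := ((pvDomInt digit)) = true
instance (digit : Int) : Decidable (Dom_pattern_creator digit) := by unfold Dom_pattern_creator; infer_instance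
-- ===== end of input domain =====

-- B replaces A's membership test + nested subtractive-pair scan with closed-form arithmetic case
-- analysis (objective: simpler); B differs from A only on the negative digits -4, -5, -9 (see D_).

-- ===== PORT A =====
-- the nested 'for i in nums: for j in nums:' with early return, as a recursion over the pair list
def pcPairLoop (digit : Int) : List (Int × Int) → Option (List Int)
  | [] => none
  | (i, j) :: rest =>
      if i - j = digit ∧ i ≠ j then some [j, i] else pcPairLoop digit rest

def pattern_creator (digit : Int) : List Int :=
  let nums : List Int := [1, 5, 10]
  if digit ∈ nums then [digit]
  else
    match pcPairLoop digit (nums.flatMap fun i => nums.map fun j => (i, j)) with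
    | some r => r
    | none =>
        if digit > 5 then 5 :: List.replicate (digit - 5).toNat 1
        else List.replicate digit.toNat 1

-- ===== PORT B =====
def pattern_creator_alt (digit : Int) : List Int :=
  if digit = 4 ∨ digit = 9 then [1, digit + 1]
  else if digit = 10 then [10]
  else if digit ≥ 5 then 5 :: List.replicate (digit - 5).toNat 1
  else List.replicate digit.toNat 1

-- ===== PRECONDITION & SPEC =====
-- On the negative digits -4, -5 and -9 A's nested subtractive loop accidentally fires and returns a
-- reversed pair such as [5, 1]; B returns [] there as for every other negative digit, the intended
-- value since a digit position is never negative.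
def D_pattern_creator (digit : Int) : Prop := digit = -4 ∨ digit = -5 ∨ digit = -9
instance (digit : Int) : Decidable (D_pattern_creator digit) := by unfold D_pattern_creator; infer_instance

def Spec_pattern_creator (digit : Int) (out : List Int) : Prop := ¬ D_pattern_creator digit → out = pattern_creator_alt digit
instance (digit : Int) (out : List Int) : Decidable (Spec_pattern_creator digit out) := by unfold Spec_pattern_creator; infer_instance

def pvDiffWitness_pattern_creator : Int := (-4)
def pvDiffWitnessOut_pattern_creator : (List Int) × (List Int) := ([5, 1], [])

-- ===== CLAIM (what is proved, stated in full; the proofs are below) =====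
def Claim_unchanged_pattern_creator : Prop := ∀ (digit : Int), Dom_pattern_creator digit → Spec_pattern_creator digit (pattern_creator digit)
def Claim_changed_pattern_creator : Prop := Dom_pattern_creator (pvDiffWitness_pattern_creator) ∧ D_pattern_creator (pvDiffWitness_pattern_creator) ∧ pattern_creator (pvDiffWitness_pattern_creator) = pvDiffWitnessOut_pattern_creator.1 ∧ pattern_creator_alt (pvDiffWitness_pattern_creator) = pvDiffWitnessOut_pattern_creator.2 ∧ pvDiffWitnessOut_pattern_creator.1 ≠ pvDiffWitnessOut_pattern_creator.2
def Claim_exact_pattern_creator : Prop := ∀ (digit : Int), Dom_pattern_creator digit → D_pattern_creator digit → pattern_creator digit ≠ pattern_creator_alt digit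

-- ===== LEMMAS AND PROOFS =====

-- outside the five special digits handled by A's membership test and pair scan (and the three
-- negative digits of D_), both programs take the same arithmetic fallback
theorem pattern_creator_eq (digit : Int) (hD : ¬ D_pattern_creator digit) :
    pattern_creator digit = pattern_creator_alt digit := by
  by_cases h1 : digit = 1; · subst h1; decide
  by_cases h5 : digit = 5; · subst h5; decide
  by_cases h10 : digit = 10; · subst h10; decide
  by_cases h4 : digit = 4; · subst h4; decide
  by_cases h9 : digit = 9; · subst h9; decide
  have hm4 : digit ≠ -4 := fun h => hD (Or.inl h)
  have hm5 : digit ≠ -5 := fun h => hD (Or.inr (Or.inl h))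
  have hm9 : digit ≠ -9 := fun h => hD (Or.inr (Or.inr h))
  have hmem : digit ∉ ([1, 5, 10] : List Int) := by simp [h1, h5, h10]
  have hloop : pcPairLoop digit
      (([1, 5, 10] : List Int).flatMap fun i => ([1, 5, 10] : List Int).map fun j => (i, j)) = none := by
    simp only [List.flatMap, List.map, List.flatten, List.append]
    simp only [pcPairLoop]
    split_ifs with c1 c2 c3 c4 c5 c6 c7 c8 c9 <;> first
      | rfl
      | (exfalso; omega)
  simp only [pattern_creator, pattern_creator_alt]
  rw [if_neg hmem, hloop]
  rw [if_neg (by omega : ¬ (digit = 4 ∨ digit = 9)), if_neg h10]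
  by_cases hgt : digit > 5
  · rw [if_pos hgt, if_pos (by omega : digit ≥ 5)]
  · rw [if_neg hgt, if_neg (by omega : ¬ digit ≥ 5)]

-- ===== VERDICT (by name: the statement is the Claim_ definition above) =====
theorem pattern_creator_spec : Claim_unchanged_pattern_creator := by
  intro digit _ hD
  exact pattern_creator_eq digit hD

theorem pattern_creator_changed : Claim_changed_pattern_creator := by
  unfold Claim_changed_pattern_creator; decide

theorem pattern_creator_tight : Claim_exact_pattern_creator := by
  intro digit _ hD
  rcases hD with h | h | h <;> subst h <;> decide
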